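-- pv_equiv track=rewrite | github.com/ds-chkang/algorithms | MinMaxSum.py | find_min_sum
-- ===== SOURCE A (Python) =====
-- def find_min_sum(arr, how_many_nums):
--     min_sum = 0
--     min_set = set()
--     data_set = set(arr)
--     for _ in range(how_many_nums):
--         try:
--             min_set.add(min(data_set.difference(min_set)))
--         except:
--             break
--     if len(min_set) < how_many_nums:
--         min_sum = sum(min_set) + (sum(min_set)*(how_many_nums-len(min_set)))
--     else:
--         min_sum = sum(min_set)
--     return min_sum
-- ===== SOURCE B (Python) =====
-- def find_min_sum(arr, how_many_nums):
--     k = max(how_many_nums, 0)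
--     vals = sorted(set(arr))[:k]
--     s = sum(vals)
--     if len(vals) < how_many_nums:
--         return s * (how_many_nums - len(vals) + 1)
--     return s
-- ===== Notes on version B (the rewrite author's own statement) =====
-- stated objective: faster
-- what changed: Replaces k repeated min-scans over the shrinking set difference with one sort of the distinct values followed by a take-k slice and a single sum, folding A's fallback 'S + S*(k-d)' into 'S*(k-d+1)'.
import Mathlib
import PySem

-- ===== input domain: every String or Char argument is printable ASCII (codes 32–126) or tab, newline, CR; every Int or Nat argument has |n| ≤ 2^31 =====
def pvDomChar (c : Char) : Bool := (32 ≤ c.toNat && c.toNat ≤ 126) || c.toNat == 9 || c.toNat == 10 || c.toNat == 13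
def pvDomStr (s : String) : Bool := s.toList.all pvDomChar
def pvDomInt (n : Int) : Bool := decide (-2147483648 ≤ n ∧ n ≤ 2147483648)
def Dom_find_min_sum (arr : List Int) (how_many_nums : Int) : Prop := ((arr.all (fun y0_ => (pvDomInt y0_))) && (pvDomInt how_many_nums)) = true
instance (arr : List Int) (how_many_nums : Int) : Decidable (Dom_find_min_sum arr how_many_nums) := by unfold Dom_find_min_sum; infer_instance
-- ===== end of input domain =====

-- B replaces A's k repeated min-scans over the shrinking set difference with one sort of the
-- distinct values, a take-k slice and a single sum (faster); return values agree everywhere.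

-- ===== PORT A =====
-- the 'for _ in range(how_many_nums)' loop: n iterations left, min_set the accumulator;
-- min(data_set.difference(min_set)) raising ValueError on an empty set is the 'none' branch = break
def find_min_sum_loop (data_set : PySem.Set Int) : Nat → PySem.Set Int → PySem.Set Int
  | 0, min_set => min_set
  | n + 1, min_set =>
    match PySem.List.min? (PySem.Set.diff data_set min_set) (fun x => x) with
    | none => min_set
    | some m => find_min_sum_loop data_set n (PySem.Set.add min_set m)

def find_min_sum (arr : List Int) (how_many_nums : Int) : Int :=
  let data_set : PySem.Set Int := PySem.Set.ofList arr
  -- range(how_many_nums) has how_many_nums.toNat elements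
  let min_set := find_min_sum_loop data_set how_many_nums.toNat PySem.Set.empty
  if (min_set.length : Int) < how_many_nums then
    min_set.sum + min_set.sum * (how_many_nums - (min_set.length : Int))
  else
    min_set.sum

-- ===== PORT B =====
def find_min_sum_alt (arr : List Int) (how_many_nums : Int) : Int :=
  let k := max how_many_nums 0
  -- sorted(set(arr))[:k] with k ≥ 0 is take k
  let vals := (PySem.List.sorted (PySem.Set.ofList arr) (fun x => x) false).take k.toNat
  let s := vals.sum
  if (vals.length : Int) < how_many_nums then s * (how_many_nums - (vals.length : Int) + 1)
  else s

-- ===== PRECONDITION & SPEC =====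
def Spec_find_min_sum (arr : List Int) (how_many_nums : Int) (out : Int) : Prop := out = find_min_sum_alt arr how_many_nums
instance (arr : List Int) (how_many_nums : Int) (out : Int) : Decidable (Spec_find_min_sum arr how_many_nums out) := by unfold Spec_find_min_sum; infer_instance

-- ===== CLAIM (what is proved, stated in full; the proofs are below) =====
def Claim_equal_find_min_sum : Prop := ∀ (arr : List Int) (how_many_nums : Int), Dom_find_min_sum arr how_many_nums → Spec_find_min_sum arr how_many_nums (find_min_sum arr how_many_nums)

-- ===== LEMMAS AND PROOFS =====

-- Core invariant: with L the strictly-sorted distinct values, running A's loop n more times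
-- starting from the first j of L yields the first j+n of L (take saturates at L.length).
theorem find_min_sum_loop_take (D L : List Int) (hperm : L.Perm D)
    (hsort : L.Pairwise (· < ·)) :
    ∀ (n j : Nat), find_min_sum_loop D n (L.take j) = L.take (j + n) := by
  have hnd : L.Nodup := hsort.imp (fun {a b} h => ne_of_lt h)
  intro n
  induction n with
  | zero => intro j; simp [find_min_sum_loop]
  | succ n ih =>
    intro j
    by_cases hj : j < L.length
    · have hLj : L[j] ∈ PySem.Set.diff D (L.take j) := by
        have h1 : L[j] ∈ D := hperm.mem_iff.mp (List.getElem_mem hj)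
        have h2 : L[j] ∉ L.take j := by
          intro hmem
          obtain ⟨i, hi, hieq⟩ := List.mem_iff_getElem.mp hmem
          rw [List.length_take] at hi
          have hij : i < j := lt_of_lt_of_le hi (min_le_left _ _)
          rw [List.getElem_take] at hieq
          exact absurd (hnd.getElem_inj_iff.mp hieq) (by omega)
        simp [PySem.Set.diff, PySem.Set.contains, List.mem_filter, h1, h2]
      have hne : PySem.Set.diff D (L.take j) ≠ [] := fun h => by simp [h] at hLj
      obtain ⟨m, hm⟩ : ∃ m, PySem.List.min? (PySem.Set.diff D (L.take j)) (fun x => x) = some m := by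
        cases hmin : PySem.List.min? (PySem.Set.diff D (L.take j)) (fun x => x) with
        | none => exact absurd ((PySem.List.min?_eq_none_iff _ _).mp hmin) hne
        | some m => exact ⟨m, rfl⟩
      have hmmem := PySem.List.min?_mem hm
      have hmin := PySem.List.min?_isMin hm
      -- m = L[j]
      have hmem' : m ∈ L ∧ m ∉ L.take j := by
        have := List.mem_filter.mp hmmem
        refine ⟨hperm.mem_iff.mpr this.1, by simpa [PySem.Set.contains] using this.2⟩
      have hge : L[j] ≤ m := by
        obtain ⟨i, hi, hieq⟩ := List.mem_iff_getElem.mp hmem'.1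
        have hji : j ≤ i := by
          by_contra hlt
          exact hmem'.2 (hieq ▸ List.mem_take_iff_getElem.mpr ⟨i, by omega, by simp⟩)
        rcases Nat.eq_or_lt_of_le hji with h | h
        · subst h; exact le_of_eq hieq
        · exact le_of_lt (hieq ▸ List.pairwise_iff_getElem.mp hsort j i hj hi h)
      have hle : m ≤ L[j] := hmin L[j] hLj
      have hmeq : m = L[j] := le_antisymm hle hge
      have hadd : PySem.Set.add (L.take j) m = L.take (j + 1) := by
        have hnc : (L.take j).contains m = false := by
          simp only [List.contains_eq_mem, decide_eq_false_iff_not]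
          exact hmem'.2
        rw [hmeq] at hnc
        simp only [PySem.Set.add, PySem.Set.contains, hmeq, hnc]
        rw [List.take_add_one, List.getElem?_eq_getElem hj]
        simp
      simp only [find_min_sum_loop, hm, hadd, ih (j + 1)]
      congr 1
      omega
    · -- all of D already taken: difference empty, loop stops
      have hjL : L.take j = L := List.take_of_length_le (by omega)
      have hempty : PySem.Set.diff D (L.take j) = [] := by
        rw [hjL]
        refine List.filter_eq_nil_iff.mpr (fun x hx => ?_)
        have : x ∈ L := hperm.mem_iff.mpr hx
        simp [PySem.Set.contains, this]
      have hmin : PySem.List.min? (PySem.Set.diff D (L.take j)) (fun x => x) = none := by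
        rw [hempty]; exact (PySem.List.min?_eq_none_iff _ _).mpr rfl
      simp only [find_min_sum_loop, hmin]
      rw [hjL, List.take_of_length_le (by omega)]

-- ===== VERDICT (by name: the statement is the Claim_ definition above) =====
theorem find_min_sum_spec : Claim_equal_find_min_sum := by
  intro arr how_many_nums _
  unfold Spec_find_min_sum find_min_sum find_min_sum_alt
  have hloop := find_min_sum_loop_take (PySem.Set.ofList arr)
      (PySem.List.sorted (PySem.Set.ofList arr) (fun x => x) false)
      (PySem.List.sorted_perm _ _ _) (PySem.List.sorted_ofList_pairwise_lt arr)
      how_many_nums.toNat 0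
  have hk : (max how_many_nums 0).toNat = how_many_nums.toNat := by omega
  simp only [PySem.Set.empty]
  rw [show ([] : List Int) = (PySem.List.sorted (PySem.Set.ofList arr) (fun x => x) false).take 0 from rfl,
    hloop, hk, Nat.zero_add]
  set vals := (PySem.List.sorted (PySem.Set.ofList arr) (fun x => x) false).take how_many_nums.toNat
  split_ifs <;> ring
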